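-- pv_equiv track=rewrite | github.com/lxmcathy/UOB-Year-3 | Evolutionary Computation/EV 2/code/ca2.py | checkConnected
-- ===== SOURCE A (Python) =====
-- def shortestPath(v1, v2, adjacencyMatrix):
--
--     if v1 == v2:
--         return 0
--     visited = []
--
--     dist = -1
--     queue = [[v1]]
--
--     while queue:
--
--         path = queue.pop(0)
--         node = path[-1]
--
--         if node not in visited:
--
--             visited.append(node)
--
--             for i in range(len(adjacencyMatrix)):
--
--                 if adjacencyMatrix[node][i] == 0:
--                     continue
--
--                 newPath = list(path)
--                 newPath.append(i)
--                 queue.append(newPath)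
--
--                 if i == v2:
--                     return len(newPath) - 1
--
--
--     return float('INF')
--
-- def checkConnected(adjacencyMatrix):
--
--     N = len(adjacencyMatrix)
--
--     distanceMatrix = [[float("INF") for _ in range(N)] for _ in range(N)]
--
--     for i in range(N):
--
--         for j in range(N):
--
--             distanceMatrix[i][j] = shortestPath(i, j, adjacencyMatrix)
--
--             if distanceMatrix[i][j] == float("INF"):
--                 return False
--
--
--     return True
-- ===== SOURCE B (Python) =====
-- def checkConnected(adjacencyMatrix):
--     n = len(adjacencyMatrix)
--     for s in range(n):
--         seen = [False] * n
--         seen[s] = True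
--         stack = [s]
--         while stack:
--             u = stack.pop()
--             for v in range(n):
--                 if adjacencyMatrix[u][v] != 0 and not seen[v]:
--                     seen[v] = True
--                     stack.append(v)
--         if not all(seen):
--             return False
--     return True
-- ===== Notes on version B (the rewrite author's own statement) =====
-- stated objective: alternative
-- what changed: Replaces the per-pair BFS that copies whole path lists and pops from the front of a Python list with a single boolean-array DFS per source node (each node expanded once per source, no path objects), short-circuiting on the first source that cannot reach everything; intended as cheaper (measured about 2x on a timing run's inputs, unconfirmed at the largest size), claimed only as a different algorithm.
-- outside the precondition, e.g. on checkConnected([[1, 1], [1]]): A returns True, B raises IndexError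
import Mathlib
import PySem

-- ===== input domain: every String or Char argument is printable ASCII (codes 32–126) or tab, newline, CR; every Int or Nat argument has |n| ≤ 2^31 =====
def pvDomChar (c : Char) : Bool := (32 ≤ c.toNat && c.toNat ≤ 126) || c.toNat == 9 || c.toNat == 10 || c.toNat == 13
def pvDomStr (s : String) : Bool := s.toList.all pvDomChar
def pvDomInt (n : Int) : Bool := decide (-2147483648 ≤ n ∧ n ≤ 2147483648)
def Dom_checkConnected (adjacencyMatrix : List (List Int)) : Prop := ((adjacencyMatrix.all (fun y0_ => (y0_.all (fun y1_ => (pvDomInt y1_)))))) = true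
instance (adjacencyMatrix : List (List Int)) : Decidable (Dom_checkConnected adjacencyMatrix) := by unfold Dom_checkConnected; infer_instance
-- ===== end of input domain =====

-- B replaces A's per-pair BFS over explicit path lists by one boolean-array DFS per
-- source node (each node expanded once per source), short-circuiting per source.

-- ===== PORT A =====
-- adjacencyMatrix[u][i]: both indices are in range whenever A runs without raising
-- (u, i < len(adjacencyMatrix), and rows have length ≥ len(adjacencyMatrix) by Pre_),
-- so the getD default is never consulted on admitted inputs.

def pvAtA (adj : List (List Int)) (u i : Nat) : Int := (adj.getD u []).getD i 0

-- path[-1]; every path in the queue is nonempty, so the default is never consulted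
def pvLastA (p : List Nat) : Nat := p.getLast?.getD 0

-- the inner 'for i in range(len(adjacencyMatrix))' of shortestPath: skip zero entries,
-- append newPath to the queue, early-return len(newPath)-1 when i == v2
def pvInnerA (adj : List (List Int)) (v2 : Nat) (path : List Nat) (node : Nat)
    (i : Nat) (q : List (List Nat)) : Sum Int (List (List Nat)) :=
  if _h : i < adj.length then
    if pvAtA adj node i == 0 then pvInnerA adj v2 path node (i + 1) q
    else
      let newPath := path ++ [i]
      let q' := q ++ [newPath]
      if i == v2 then Sum.inl ((newPath.length : Int) - 1)
      else pvInnerA adj v2 path node (i + 1) q'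
  else Sum.inr q
termination_by adj.length - i

-- the 'while queue' loop; 'none' plays float('INF'). The fuel argument is only a
-- termination device: shortestPath passes N*N+N+1, proved sufficient by the lemmas below.
def pvSPLoop (adj : List (List Int)) (v2 : Nat) :
    Nat → List Nat → List (List Nat) → Option Int
  | 0, _, _ => none
  | _ + 1, _, [] => none
  | fuel + 1, visited, path :: rest =>
    let node := pvLastA path
    if node ∈ visited then pvSPLoop adj v2 fuel visited rest
    else
      match pvInnerA adj v2 path node 0 rest with
      | Sum.inl d => some d
      | Sum.inr q' => pvSPLoop adj v2 fuel (visited ++ [node]) q'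

def pvShortestPathA (v1 v2 : Nat) (adj : List (List Int)) : Option Int :=
  if v1 = v2 then some 0
  else pvSPLoop adj v2 (adj.length * adj.length + adj.length + 1) [] [[v1]]

-- inner 'for j in range(N)' of checkConnected: fills row i of distanceMatrix (write-only
-- in A, threaded here all the same) and early-returns none (= Python's 'return False')
-- on the first INF entry
def pvRowLoopA (adj : List (List Int)) (i j : Nat) (row : List (Option Int)) :
    Option (List (Option Int)) :=
  if _h : j < adj.length then
    let d := pvShortestPathA i j adj
    let row' := row ++ [d]
    if d = none then none else pvRowLoopA adj i (j + 1) row'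
  else some row
termination_by adj.length - j

-- outer 'for i in range(N)' of checkConnected, threading the matrix
def pvMatLoopA (adj : List (List Int)) (i : Nat) (mat : List (List (Option Int))) :
    Option (List (List (Option Int))) :=
  if _h : i < adj.length then
    match pvRowLoopA adj i 0 [] with
    | none => none
    | some row => pvMatLoopA adj (i + 1) (mat ++ [row])
  else some mat
termination_by adj.length - i

def checkConnected (adjacencyMatrix : List (List Int)) : Bool :=
  match pvMatLoopA adjacencyMatrix 0 [] with
  | none => false
  | some _ => true

-- ===== PORT B =====
-- the 'for v in range(n)' scan of one popped node u: mark unseen neighbours, push them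
-- (adjacencyMatrix[u][v] is read through the same in-range accessor pvAtA as in port A)
def pvScanB (adj : List (List Int)) (u v : Nat) (seen : List Bool) (stack : List Nat) :
    List Bool × List Nat :=
  if _h : v < adj.length then
    if pvAtA adj u v != 0 && !(seen.getD v false) then
      pvScanB adj u (v + 1) (seen.set v true) (v :: stack)
    else pvScanB adj u (v + 1) seen stack
  else (seen, stack)
termination_by adj.length - v

-- 'while stack': the stack is kept top-first (Python pushes/pops at the end — the same
-- LIFO discipline). Fuel n+1 is a termination device, proved sufficient by the lemmas below.
def pvDFSB (adj : List (List Int)) : Nat → List Bool → List Nat → List Bool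
  | _, seen, [] => seen
  | 0, seen, _ => seen
  | fuel + 1, seen, u :: rest =>
    let r := pvScanB adj u 0 seen rest
    pvDFSB adj fuel r.1 r.2

-- one source s: seen = [False]*n; seen[s] = True; stack = [s]; dfs; all(seen)
def pvSourceB (adj : List (List Int)) (s : Nat) : Bool :=
  let seen0 := (List.replicate adj.length false).set s true
  let seen := pvDFSB adj (adj.length + 1) seen0 [s]
  seen.all (fun b => b)

-- 'for s in range(n)' with early 'return False'
def pvOuterB (adj : List (List Int)) (s : Nat) : Bool :=
  if _h : s < adj.length then
    if pvSourceB adj s then pvOuterB adj (s + 1) else false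
  else true
termination_by adj.length - s

def checkConnected_alt (adjacencyMatrix : List (List Int)) : Bool :=
  pvOuterB adjacencyMatrix 0

-- ===== PRECONDITION & SPEC =====
-- Pre_ restricts to well-formed matrices (every row at least N = len(adjacencyMatrix)
-- long) — the natural domain of an N-node adjacency matrix. On more ragged inputs
-- Python A raises IndexError whenever its traversal touches a short row, and whether it
-- raises or returns False first depends on the traversal order, so those inputs are
-- excluded even though A happens to return on some of them (see the cite in the claim).
def Pre_checkConnected (adjacencyMatrix : List (List Int)) : Prop :=
  ∀ row ∈ adjacencyMatrix, adjacencyMatrix.length ≤ row.length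
instance (adjacencyMatrix : List (List Int)) : Decidable (Pre_checkConnected adjacencyMatrix) := by
  unfold Pre_checkConnected; infer_instance

def pvWitness_checkConnected : List (List Int) := [[1, 1], [1, 0]]

def Spec_checkConnected (adjacencyMatrix : List (List Int)) (out : Bool) : Prop := out = checkConnected_alt adjacencyMatrix
instance (adjacencyMatrix : List (List Int)) (out : Bool) : Decidable (Spec_checkConnected adjacencyMatrix out) := by unfold Spec_checkConnected; infer_instance

-- ===== CLAIM (what is proved, stated in full; the proofs are below) =====
def Claim_equal_checkConnected : Prop := ∀ (adjacencyMatrix : List (List Int)), Dom_checkConnected adjacencyMatrix → Pre_checkConnected adjacencyMatrix → Spec_checkConnected adjacencyMatrix (checkConnected adjacencyMatrix)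

-- ===== LEMMAS AND PROOFS =====

-- Both programs decide the same proposition: every j < N is reachable from every i < N
-- along nonzero entries. pvE/pvReach name that relation; each side is proved equivalent
-- to it (A via a BFS queue invariant, B via a DFS seen/stack invariant), with the fuel
-- bounds discharged by the decreasing measures in pvSPLoop_correct / pvDFSB_correct.
def pvE (adj : List (List Int)) (u v : Nat) : Prop :=
  v < adj.length ∧ (adj.getD u []).getD v 0 ≠ 0

def pvReach (adj : List (List Int)) : Nat → Nat → Prop :=
  Relation.ReflTransGen (pvE adj)

theorem pvReach_closed {adj : List (List Int)} {s x : Nat} (P : Nat → Prop)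
    (hs : P s) (hcl : ∀ u, P u → ∀ v, pvE adj u v → P v) (h : pvReach adj s x) : P x := by
  induction h with
  | refl => exact hs
  | tail _ hbc ih => exact hcl _ ih _ hbc

theorem pvNodupLen {l : List Nat} {N : Nat} (hnd : l.Nodup) (hlt : ∀ x ∈ l, x < N) :
    l.length ≤ N := by
  classical
  calc l.length = l.toFinset.card := (List.toFinset_card_of_nodup hnd).symm
    _ ≤ (Finset.range N).card := by
        apply Finset.card_le_card
        intro x hx
        simp only [List.mem_toFinset] at hx
        simpa using hlt x hx
    _ = N := Finset.card_range N

theorem pvLastA_concat (p : List Nat) (a : Nat) : pvLastA (p ++ [a]) = a := by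
  simp [pvLastA]

theorem pvMemMapCons {y : Nat} {p : List Nat} {rest : List (List Nat)} :
    y ∈ List.map pvLastA (p :: rest) ↔ y = pvLastA p ∨ y ∈ List.map pvLastA rest := by
  rw [List.map_cons, List.mem_cons]

theorem pvInnerA_inl {adj : List (List Int)} {v2 : Nat} {path : List Nat} {node : Nat} :
    ∀ i q d, pvInnerA adj v2 path node i q = Sum.inl d →
      i ≤ v2 ∧ v2 < adj.length ∧ pvAtA adj node v2 ≠ 0 := by
  intro i q d
  fun_induction pvInnerA adj v2 path node i q with
  | case1 i q h hz ih =>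
    intro he; obtain ⟨h1, h2, h3⟩ := ih he; exact ⟨by omega, h2, h3⟩
  | case2 i q h hnz np hiv =>
    intro _
    have hiv' : i = v2 := by simpa using hiv
    subst hiv'
    exact ⟨le_refl _, h, by simpa using hnz⟩
  | case3 i q h hnz np q' hiv ih =>
    intro he; obtain ⟨h1, h2, h3⟩ := ih he; exact ⟨by omega, h2, h3⟩
  | case4 i q h => intro he; simp at he

theorem pvInnerA_inr {adj : List (List Int)} {v2 : Nat} {path : List Nat} {node : Nat} :
    ∀ i q q', pvInnerA adj v2 path node i q = Sum.inr q' →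
      ¬(i ≤ v2 ∧ v2 < adj.length ∧ pvAtA adj node v2 ≠ 0) ∧
      q'.length ≤ q.length + (adj.length - i) ∧
      (∀ x, x ∈ q'.map pvLastA ↔ x ∈ q.map pvLastA ∨
        (i ≤ x ∧ x < adj.length ∧ pvAtA adj node x ≠ 0)) := by
  intro i q q'
  fun_induction pvInnerA adj v2 path node i q with
  | case1 i q h hz ih =>
    intro he
    obtain ⟨hnc, hlen, hmem⟩ := ih he
    have hz' : pvAtA adj node i = 0 := by simpa using hz
    refine ⟨?_, by omega, ?_⟩
    · rintro ⟨h1, h2, h3⟩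
      rcases Nat.eq_or_lt_of_le h1 with h4 | h4
      · exact h3 (h4 ▸ hz')
      · exact hnc ⟨h4, h2, h3⟩
    · intro x
      rw [hmem x]
      constructor
      · rintro (hx | ⟨h1, h2, h3⟩)
        · exact Or.inl hx
        · exact Or.inr ⟨by omega, h2, h3⟩
      · rintro (hx | ⟨h1, h2, h3⟩)
        · exact Or.inl hx
        · refine Or.inr ⟨?_, h2, h3⟩
          rcases Nat.eq_or_lt_of_le h1 with h4 | h4
          · exact absurd (h4 ▸ hz') h3
          · omega
  | case2 i q h hnz np hiv => intro he; simp at he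
  | case3 i q h hnz np qq hiv ih =>
    intro he
    obtain ⟨hnc, hlen, hmem⟩ := ih he
    simp only [np, qq] at hnc hlen hmem
    have hnz' : pvAtA adj node i ≠ 0 := by simpa using hnz
    have hiv' : i ≠ v2 := by simpa using hiv
    refine ⟨?_, by simp at hlen; omega, ?_⟩
    · rintro ⟨h1, h2, h3⟩
      exact hnc ⟨by omega, h2, h3⟩
    · intro x
      rw [hmem x]
      simp only [List.map_append, List.map_cons, List.map_nil, List.mem_append,
        List.mem_cons, List.mem_singleton, pvLastA_concat]
      constructor
      · rintro ((hx | hx | hx) | ⟨h1, h2, h3⟩)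
        · exact Or.inl hx
        · subst hx; exact Or.inr ⟨le_refl _, h, hnz'⟩
        · simp at hx
        · exact Or.inr ⟨by omega, h2, h3⟩
      · rintro (hx | ⟨h1, h2, h3⟩)
        · exact Or.inl (Or.inl hx)
        · by_cases hxi : x = i
          · exact Or.inl (Or.inr (Or.inl hxi))
          · exact Or.inr ⟨by omega, h2, h3⟩
  | case4 i q h =>
    intro he
    have : q' = q := by simpa using he.symm
    subst this
    refine ⟨by omega, by omega, ?_⟩
    intro x
    constructor
    · exact Or.inl
    · rintro (hx | ⟨h1, h2, h3⟩)
      · exact hx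
      · omega

def pvInvA (adj : List (List Int)) (v1 v2 : Nat) (visited : List Nat)
    (queue : List (List Nat)) : Prop :=
  visited.Nodup ∧
  (∀ x ∈ visited, x < adj.length) ∧
  (∀ p ∈ queue, pvReach adj v1 (pvLastA p)) ∧
  (∀ u ∈ visited, ¬ pvE adj u v2 ∧ ∀ y, pvE adj u y → y ∈ visited ∨ y ∈ queue.map pvLastA) ∧
  (v1 ∈ visited ∨ v1 ∈ queue.map pvLastA) ∧
  v2 ∉ visited ∧
  (∀ x ∈ queue.map pvLastA, x ≠ v2) ∧
  (∀ x ∈ queue.map pvLastA, x < adj.length)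

theorem pvInvA_empty {adj : List (List Int)} {v1 v2 : Nat} {visited : List Nat}
    (hInv : pvInvA adj v1 v2 visited []) : ¬ pvReach adj v1 v2 := by
  obtain ⟨_, _, _, a4, a5, a6, _, _⟩ := hInv
  have hv1 : v1 ∈ visited := by simpa using a5
  intro hr
  have hv2 : v2 ∈ visited := by
    refine pvReach_closed (fun x => x ∈ visited) hv1 ?_ hr
    intro u hu v hv
    rcases (a4 u hu).2 v hv with h | h
    · exact h
    · simp at h
  exact a6 hv2

theorem pvSPLoop_correct {adj : List (List Int)} {v1 v2 : Nat} :
    ∀ fuel visited queue, pvInvA adj v1 v2 visited queue →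
      queue.length + (adj.length - visited.length) * (adj.length + 1) ≤ fuel →
      ((pvSPLoop adj v2 fuel visited queue).isSome = true ↔ pvReach adj v1 v2) := by
  intro fuel
  induction fuel with
  | zero =>
    intro visited queue hInv hfu
    cases queue with
    | nil =>
      have h0 : pvSPLoop adj v2 0 visited [] = none := rfl
      rw [h0]; simpa using pvInvA_empty hInv
    | cons p rest => simp at hfu
  | succ fuel ih =>
    intro visited queue hInv hfu
    cases queue with
    | nil =>
      have h0 : pvSPLoop adj v2 (fuel+1) visited [] = none := rfl
      rw [h0]; simpa using pvInvA_empty hInv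
    | cons p rest =>
      obtain ⟨a1, a2, a3, a4, a5, a6, a7, a8⟩ := hInv
      have hnodeN : pvLastA p < adj.length := a8 _ (by simp)
      have hnodev2 : pvLastA p ≠ v2 := a7 _ (by simp)
      have hreachnode : pvReach adj v1 (pvLastA p) := a3 p (by simp)
      simp only [pvSPLoop]
      by_cases hmemv : pvLastA p ∈ visited
      · simp only [hmemv, if_true]
        apply ih
        · refine ⟨a1, a2, ?_, ?_, ?_, a6, ?_, ?_⟩
          · exact fun p' hp' => a3 p' (List.mem_cons_of_mem _ hp')
          · intro u hu
            refine ⟨(a4 u hu).1, ?_⟩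
            intro y hy
            rcases (a4 u hu).2 y hy with h | h
            · exact Or.inl h
            · rcases pvMemMapCons.mp h with h' | h'
              · exact Or.inl (h' ▸ hmemv)
              · exact Or.inr h'
          · rcases a5 with h | h
            · exact Or.inl h
            · rcases pvMemMapCons.mp h with h' | h'
              · exact Or.inl (h' ▸ hmemv)
              · exact Or.inr h'
          · exact fun x hx => a7 x (by simp [hx])
          · exact fun x hx => a8 x (by simp [hx])
        · simp at hfu ⊢; omega
      · simp only [hmemv, if_false]
        cases hinner : pvInnerA adj v2 p (pvLastA p) 0 rest with
        | inl d =>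
          simp only [Option.isSome_some, true_iff]
          obtain ⟨-, hv2N, hat⟩ := pvInnerA_inl 0 rest d hinner
          exact Relation.ReflTransGen.tail hreachnode ⟨hv2N, hat⟩
        | inr q' =>
          obtain ⟨hnc, hlen, hmem⟩ := pvInnerA_inr 0 rest q' hinner
          have hnE : ¬ pvE adj (pvLastA p) v2 := fun h => hnc ⟨Nat.zero_le _, h.1, h.2⟩
          have hvlen : visited.length < adj.length := by
            have h1 : (visited ++ [pvLastA p]).Nodup := by
              simp [List.nodup_append, a1]
              intro a ha he
              exact hmemv (he ▸ ha)
            have h2 : ∀ x ∈ visited ++ [pvLastA p], x < adj.length := by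
              intro x hx
              rcases List.mem_append.mp hx with h | h
              · exact a2 x h
              · simp at h; omega
            have := pvNodupLen h1 h2
            simp at this; omega
          apply ih
          · refine ⟨?_, ?_, ?_, ?_, ?_, ?_, ?_, ?_⟩
            · simp [List.nodup_append, a1]
              intro a ha he
              exact hmemv (he ▸ ha)
            · intro x hx
              rcases List.mem_append.mp hx with h | h
              · exact a2 x h
              · simp at h; omega
            · intro p' hp'
              have : pvLastA p' ∈ q'.map pvLastA := List.mem_map_of_mem hp'
              rcases (hmem _).mp this with h | ⟨_, h2, h3⟩
              · obtain ⟨p'', hp'', he⟩ := List.mem_map.mp h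
                exact he ▸ a3 p'' (List.mem_cons_of_mem _ hp'')
              · exact Relation.ReflTransGen.tail hreachnode ⟨h2, h3⟩
            · intro u hu
              rcases List.mem_append.mp hu with h | h
              · refine ⟨(a4 u h).1, ?_⟩
                intro y hy
                rcases (a4 u h).2 y hy with h' | h'
                · exact Or.inl (List.mem_append_left _ h')
                · rcases pvMemMapCons.mp h' with h'' | h''
                  · exact Or.inl (List.mem_append_right _ (by simp [h'']))
                  · exact Or.inr ((hmem y).mpr (Or.inl h''))
              · simp at h
                subst h
                refine ⟨hnE, ?_⟩
                intro y hy
                exact Or.inr ((hmem y).mpr (Or.inr ⟨Nat.zero_le _, hy.1, hy.2⟩))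
            · rcases a5 with h | h
              · exact Or.inl (List.mem_append_left _ h)
              · rcases pvMemMapCons.mp h with h' | h'
                · exact Or.inl (List.mem_append_right _ (by simp [h']))
                · exact Or.inr ((hmem v1).mpr (Or.inl h'))
            · intro hv2
              rcases List.mem_append.mp hv2 with h | h
              · exact a6 h
              · simp at h; exact hnodev2 h.symm
            · intro x hx
              rcases (hmem x).mp hx with h | ⟨_, h2, h3⟩
              · exact a7 x (pvMemMapCons.mpr (Or.inr h))
              · intro he; exact hnE (he ▸ ⟨h2, h3⟩)
            · intro x hx
              rcases (hmem x).mp hx with h | ⟨_, h2, h3⟩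
              · exact a8 x (pvMemMapCons.mpr (Or.inr h))
              · exact h2
          · have hmul : (adj.length - visited.length) * (adj.length + 1) =
                (adj.length - (visited.length + 1)) * (adj.length + 1) + (adj.length + 1) := by
              have h : adj.length - visited.length = (adj.length - (visited.length + 1)) + 1 := by
                omega
              rw [h]; ring
            have hq : (p :: rest).length = rest.length + 1 := by simp
            rw [hq] at hfu
            have hv' : (visited ++ [pvLastA p]).length = visited.length + 1 := by simp
            rw [hv']
            omega

theorem pvShortestPathA_correct {adj : List (List Int)} {v1 v2 : Nat} (h1 : v1 < adj.length) :
    ((pvShortestPathA v1 v2 adj).isSome = true ↔ pvReach adj v1 v2) := by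
  by_cases he : v1 = v2
  · subst he
    have h0 : pvShortestPathA v1 v1 adj = some 0 := by rw [pvShortestPathA, if_pos rfl]
    rw [h0]
    simp only [Option.isSome_some, true_iff]
    exact Relation.ReflTransGen.refl
  · rw [pvShortestPathA, if_neg he]
    apply pvSPLoop_correct
    · refine ⟨List.nodup_nil, by simp, ?_, by simp, ?_, by simp, ?_, ?_⟩
      · intro p hp
        simp at hp
        subst hp
        simp [pvLastA]
        exact Relation.ReflTransGen.refl
      · right; simp [pvLastA]
      · intro x hx
        simp [pvLastA] at hx
        subst hx; exact he
      · intro x hx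
        simp [pvLastA] at hx
        subst hx; exact h1
    · have h : adj.length * (adj.length + 1) = adj.length * adj.length + adj.length := by ring
      simp
      omega

theorem pvRowLoopA_correct {adj : List (List Int)} {i : Nat} (hi : i < adj.length) :
    ∀ j row, ((pvRowLoopA adj i j row).isSome = true ↔
      ∀ j', j ≤ j' → j' < adj.length → pvReach adj i j') := by
  intro j row
  fun_induction pvRowLoopA adj i j row with
  | case1 j row h d hd =>
    simp only [Option.isSome_none, Bool.false_eq_true, false_iff]
    intro hall
    have hr : pvReach adj i j := hall j (le_refl _) h
    have := (pvShortestPathA_correct hi).mpr hr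
    rw [show pvShortestPathA i j adj = d from rfl, hd] at this
    simp at this
  | case2 j row h d row2 hd ih =>
    have hr : pvReach adj i j := by
      apply (pvShortestPathA_correct hi).mp
      rw [show pvShortestPathA i j adj = d from rfl]
      exact Option.isSome_iff_ne_none.mpr hd
    rw [ih]
    constructor
    · intro hall j' h1 h2
      rcases Nat.eq_or_lt_of_le h1 with h3 | h3
      · exact h3 ▸ hr
      · exact hall j' (by omega) h2
    · intro hall j' h1 h2
      exact hall j' (by omega) h2
  | case3 j row h =>
    simp only [Option.isSome_some, true_iff]
    intro j' h1 h2
    exact absurd h2 (by omega)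

theorem pvMatLoopA_correct {adj : List (List Int)} :
    ∀ i mat, ((pvMatLoopA adj i mat).isSome = true ↔
      ∀ i', i ≤ i' → i' < adj.length → ∀ j < adj.length, pvReach adj i' j) := by
  intro i mat
  fun_induction pvMatLoopA adj i mat with
  | case1 i mat h hrow =>
    simp only [Option.isSome_none, Bool.false_eq_true, false_iff]
    intro hall
    have := (pvRowLoopA_correct h 0 []).mpr (by
      intro j' _ hj'
      exact hall i (le_refl _) h j' hj')
    rw [hrow] at this
    simp at this
  | case2 i mat h row hrow ih =>
    have hr : ∀ j < adj.length, pvReach adj i j := by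
      have := (pvRowLoopA_correct h 0 []).mp (by rw [hrow]; rfl)
      exact fun j hj => this j (Nat.zero_le _) hj
    rw [ih]
    constructor
    · intro hall i' h1 h2
      rcases Nat.eq_or_lt_of_le h1 with h3 | h3
      · exact h3 ▸ hr
      · exact hall i' (by omega) h2
    · intro hall i' h1 h2
      exact hall i' (by omega) h2
  | case3 i mat h =>
    simp only [Option.isSome_some, true_iff]
    intro i' h1 h2
    exact absurd h2 (by omega)

theorem checkConnected_iff (adj : List (List Int)) :
    (checkConnected adj = true ↔
      ∀ i < adj.length, ∀ j < adj.length, pvReach adj i j) := by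
  have h := pvMatLoopA_correct (adj := adj) 0 []
  unfold checkConnected
  cases hm : pvMatLoopA adj 0 [] with
  | none =>
    rw [hm] at h
    simp only [Option.isSome_none, Bool.false_eq_true, false_iff] at h
    simp only [Bool.false_eq_true, false_iff]
    intro hall
    exact h (fun i' _ h2 j hj => hall i' h2 j hj)
  | some m =>
    rw [hm] at h
    simp only [Option.isSome_some, true_iff] at h
    simp only [true_iff]
    exact fun i hi j hj => h i (Nat.zero_le _) hi j hj

theorem pvGetD_set_ne (l : List Bool) {i j : Nat} (h : i ≠ j) :
    (l.set i true).getD j false = l.getD j false := by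
  simp [List.getD, h]

theorem pvGetD_set_self (l : List Bool) {i : Nat} (h : i < l.length) :
    (l.set i true).getD i false = true := by
  simp [List.getD, h]

theorem pvCount_set : ∀ (l : List Bool) (i : Nat), i < l.length → l.getD i false = false →
    (l.set i true).count true = l.count true + 1 := by
  intro l
  induction l with
  | nil => intro i h; simp at h
  | cons a t ih =>
    intro i hi h0
    cases i with
    | zero =>
      have h0' : a = false := by simpa [List.getD] using h0
      subst h0'
      simp [List.count_cons]
    | succ n =>
      have hi' : n < t.length := by simpa using hi
      have h0' : t.getD n false = false := by simpa [List.getD] using h0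
      simp only [List.set_cons_succ, List.count_cons, ih n hi' h0']
      ring

theorem pvScanB_spec {adj : List (List Int)} {u : Nat} :
    ∀ v seen stack, seen.length = adj.length →
      (pvScanB adj u v seen stack).1.length = adj.length ∧
      (∀ x, (pvScanB adj u v seen stack).1.getD x false =
        (seen.getD x false || decide (v ≤ x ∧ x < adj.length ∧ pvAtA adj u x ≠ 0))) ∧
      (∀ x, x ∈ (pvScanB adj u v seen stack).2 ↔ x ∈ stack ∨
        (v ≤ x ∧ x < adj.length ∧ pvAtA adj u x ≠ 0 ∧ seen.getD x false = false)) ∧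
      ((pvScanB adj u v seen stack).2.length + seen.count true =
        stack.length + (pvScanB adj u v seen stack).1.count true) ∧
      ((∀ y ∈ stack, seen.getD y false = true) → stack.Nodup →
        ((∀ y ∈ (pvScanB adj u v seen stack).2,
            (pvScanB adj u v seen stack).1.getD y false = true) ∧
          (pvScanB adj u v seen stack).2.Nodup)) := by
  intro v seen stack hlen
  fun_induction pvScanB adj u v seen stack with
  | case1 v seen stack h hcond ih =>
    have hc : pvAtA adj u v ≠ 0 ∧ seen.getD v false = false := by
      simpa using hcond
    obtain ⟨hat, hunseen⟩ := hc
    have hvlen : v < seen.length := by omega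
    have hlen' : (seen.set v true).length = adj.length := by simpa using hlen
    obtain ⟨S1, S2, S3, S4, S5⟩ := ih hlen'
    refine ⟨S1, ?_, ?_, ?_, ?_⟩
    · intro x
      rw [S2 x]
      by_cases hxv : x = v
      · subst hxv
        rw [pvGetD_set_self seen hvlen]
        have hde : decide (x ≤ x ∧ x < adj.length ∧ pvAtA adj u x ≠ 0) = true := by
          simp [h, hat]
        simp only [hde, Bool.true_or, Bool.or_true]
      · rw [pvGetD_set_ne seen (fun he => hxv he.symm)]
        congr 1
        apply decide_eq_decide.mpr
        constructor
        · rintro ⟨h1, h2, h3⟩; exact ⟨by omega, h2, h3⟩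
        · rintro ⟨h1, h2, h3⟩; exact ⟨by omega, h2, h3⟩
    · intro x
      rw [S3 x]
      by_cases hxv : x = v
      · subst hxv
        constructor
        · intro _; exact Or.inr ⟨le_refl _, h, hat, hunseen⟩
        · intro _; exact Or.inl (by simp)
      · have hgd := pvGetD_set_ne seen (j := x) (fun he => hxv he.symm)
        constructor
        · rintro (hx | ⟨h1, h2, h3, h4⟩)
          · rcases List.mem_cons.mp hx with h' | h'
            · exact absurd h' hxv
            · exact Or.inl h'
          · exact Or.inr ⟨by omega, h2, h3, by rw [← hgd]; exact h4⟩
        · rintro (hx | ⟨h1, h2, h3, h4⟩)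
          · exact Or.inl (List.mem_cons_of_mem _ hx)
          · exact Or.inr ⟨by omega, h2, h3, by rw [hgd]; exact h4⟩
    · have hcnt : (seen.set v true).count true = seen.count true + 1 :=
        pvCount_set seen v hvlen hunseen
      rw [hcnt] at S4
      simp only [List.length_cons] at S4
      omega
    · intro hstack hnodup
      apply S5
      · intro y hy
        rcases List.mem_cons.mp hy with h' | h'
        · subst h'; exact pvGetD_set_self seen hvlen
        · by_cases hyv : y = v
          · subst hyv; exact pvGetD_set_self seen hvlen
          · rw [pvGetD_set_ne seen (fun he => hyv he.symm)]
            exact hstack y h'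
      · refine List.Nodup.cons ?_ hnodup
        intro hv
        rw [hstack v hv] at hunseen
        simp at hunseen
  | case2 v seen stack h hcond ih =>
    have hc : pvAtA adj u v = 0 ∨ seen.getD v false = true := by
      by_contra hcc
      push_neg at hcc
      obtain ⟨h1, h2⟩ := hcc
      have h2' : seen.getD v false = false := by simpa using h2
      rw [List.getD_eq_getElem?_getD] at h2'
      exact hcond (by simp [h1, h2'])
    obtain ⟨S1, S2, S3, S4, S5⟩ := ih hlen
    refine ⟨S1, ?_, ?_, S4, S5⟩
    · intro x
      rw [S2 x]
      by_cases hxv : x = v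
      · subst hxv
        rcases hc with h' | h'
        · have e1 : decide (x + 1 ≤ x ∧ x < adj.length ∧ pvAtA adj u x ≠ 0) = false := by
            apply decide_eq_false
            rintro ⟨h1, _, _⟩
            omega
          have e2 : decide (x ≤ x ∧ x < adj.length ∧ pvAtA adj u x ≠ 0) = false := by
            apply decide_eq_false
            rintro ⟨_, _, h3⟩
            exact h3 h'
          rw [e1, e2]
        · rw [h']
          simp
      · congr 1
        apply decide_eq_decide.mpr
        constructor
        · rintro ⟨h1, h2, h3⟩; exact ⟨by omega, h2, h3⟩
        · rintro ⟨h1, h2, h3⟩; exact ⟨by omega, h2, h3⟩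
    · intro x
      rw [S3 x]
      by_cases hxv : x = v
      · subst hxv
        constructor
        · rintro (hx | ⟨h1, h2, h3, h4⟩)
          · exact Or.inl hx
          · omega
        · rintro (hx | ⟨h1, h2, h3, h4⟩)
          · exact Or.inl hx
          · rcases hc with h' | h'
            · exact absurd h' h3
            · rw [h'] at h4; simp at h4
      · constructor
        · rintro (hx | ⟨h1, h2, h3, h4⟩)
          · exact Or.inl hx
          · exact Or.inr ⟨by omega, h2, h3, h4⟩
        · rintro (hx | ⟨h1, h2, h3, h4⟩)
          · exact Or.inl hx
          · exact Or.inr ⟨by omega, h2, h3, h4⟩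
  | case3 v seen stack h =>
    refine ⟨hlen, ?_, ?_, by simp [Nat.add_comm], ?_⟩
    · intro x
      have : decide (v ≤ x ∧ x < adj.length ∧ pvAtA adj u x ≠ 0) = false := by
        simp; intro h1 h2; omega
      simp [this]
    · intro x
      simp only [iff_self_or]
      rintro ⟨h1, h2, _, _⟩
      omega
    · exact fun hs hn => ⟨hs, hn⟩

def pvInvB (adj : List (List Int)) (s : Nat) (seen : List Bool) (stack : List Nat) : Prop :=
  seen.length = adj.length ∧
  seen.getD s false = true ∧
  stack.Nodup ∧
  (∀ y ∈ stack, seen.getD y false = true) ∧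
  (∀ x, seen.getD x false = true → pvReach adj s x) ∧
  (∀ u, seen.getD u false = true → u ∉ stack → ∀ v, pvE adj u v → seen.getD v false = true)

theorem pvInvB_empty {adj : List (List Int)} {s : Nat} {seen : List Bool}
    (hInv : pvInvB adj s seen []) :
    ∀ x, seen.getD x false = true ↔ pvReach adj s x := by
  obtain ⟨_, b2, _, _, b5, b6⟩ := hInv
  intro x
  constructor
  · exact b5 x
  · intro hr
    exact pvReach_closed (fun y => seen.getD y false = true) b2
      (fun u hu v hv => b6 u hu (by simp) v hv) hr

theorem pvDFSB_correct {adj : List (List Int)} {s : Nat} :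
    ∀ fuel seen stack, pvInvB adj s seen stack →
      stack.length + (adj.length - seen.count true) ≤ fuel →
      (pvDFSB adj fuel seen stack).length = adj.length ∧
      (∀ x, (pvDFSB adj fuel seen stack).getD x false = true ↔ pvReach adj s x) := by
  intro fuel
  induction fuel with
  | zero =>
    intro seen stack hInv hfu
    cases stack with
    | nil => exact ⟨hInv.1, pvInvB_empty hInv⟩
    | cons u rest => simp at hfu
  | succ fuel ih =>
    intro seen stack hInv hfu
    cases stack with
    | nil => exact ⟨hInv.1, pvInvB_empty hInv⟩
    | cons u rest =>
      obtain ⟨b1, b2, b3, b4, b5, b6⟩ := hInv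
      have huseen : seen.getD u false = true := b4 u (by simp)
      obtain ⟨S1, S2, S3, S4, S5⟩ := pvScanB_spec 0 seen rest b1
      have hrestseen : ∀ y ∈ rest, seen.getD y false = true :=
        fun y hy => b4 y (List.mem_cons_of_mem _ hy)
      have hrestnd : rest.Nodup := List.Nodup.of_cons b3
      obtain ⟨T1, T2⟩ := S5 hrestseen hrestnd
      simp only [pvDFSB]
      apply ih
      · refine ⟨S1, ?_, T2, T1, ?_, ?_⟩
        · rw [S2 s, b2, Bool.true_or]
        · intro x hx
          rw [S2 x] at hx
          rcases Bool.or_eq_true_iff.mp hx with h' | h'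
          · exact b5 x h'
          · obtain ⟨_, h1, h2⟩ := of_decide_eq_true h'
            exact Relation.ReflTransGen.tail (b5 u huseen) ⟨h1, h2⟩
        · intro w hw hnstack v' hv'
          by_cases hwu : w = u
          · subst hwu
            rw [S2 v']
            have hd : decide (0 ≤ v' ∧ v' < adj.length ∧ pvAtA adj w v' ≠ 0) = true :=
              decide_eq_true ⟨Nat.zero_le _, hv'.1, hv'.2⟩
            rw [hd, Bool.or_true]
          · by_cases hsw : seen.getD w false = true
            · have hwrest : w ∉ rest := fun hr => hnstack ((S3 w).mpr (Or.inl hr))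
              have hwstack : w ∉ u :: rest := by
                intro hmem
                rcases List.mem_cons.mp hmem with h' | h'
                · exact hwu h'
                · exact hwrest h'
              have := b6 w hsw hwstack v' hv'
              rw [S2 v', this, Bool.true_or]
            · exfalso
              have hsw' : seen.getD w false = false := by simpa using hsw
              rw [S2 w] at hw
              rcases Bool.or_eq_true_iff.mp hw with h' | h'
              · exact hsw h'
              · obtain ⟨_, h1, h2⟩ := of_decide_eq_true h'
                exact hnstack ((S3 w).mpr (Or.inr ⟨Nat.zero_le _, h1, h2, hsw'⟩))
      · have hc1 : seen.count true ≤ adj.length := b1 ▸ List.count_le_length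
        have hc2 : (pvScanB adj u 0 seen rest).1.count true ≤ adj.length :=
          S1 ▸ List.count_le_length
        simp only [List.length_cons] at hfu
        omega

theorem pvAllIff (l : List Bool) :
    (l.all (fun b => b) = true) ↔ ∀ v < l.length, l.getD v false = true := by
  rw [List.all_eq_true]
  constructor
  · intro h v hv
    rw [List.getD_eq_getElem l false hv]
    exact h _ (List.getElem_mem hv)
  · intro h x hx
    obtain ⟨i, hi, he⟩ := List.mem_iff_getElem.mp hx
    rw [← he]
    rw [← List.getD_eq_getElem l false hi]
    exact h i hi

theorem pvSourceB_correct {adj : List (List Int)} {s : Nat} (hs : s < adj.length) :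
    (pvSourceB adj s = true ↔ ∀ v < adj.length, pvReach adj s v) := by
  have hrep : ∀ x, (List.replicate adj.length false).getD x false = false := by
    intro x; simp [List.getD]
  have hlen0 : ((List.replicate adj.length false).set s true).length = adj.length := by simp
  have hs' : s < (List.replicate adj.length false).length := by simpa using hs
  have hsg : ∀ x, ((List.replicate adj.length false).set s true).getD x false =
      decide (x = s) := by
    intro x
    by_cases hxs : x = s
    · subst hxs
      rw [pvGetD_set_self _ hs']
      simp
    · rw [pvGetD_set_ne _ (fun he => hxs he.symm), hrep x]
      simp [hxs]
  have hcnt : ((List.replicate adj.length false).set s true).count true = 1 := by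
    rw [pvCount_set _ s hs' (hrep s)]
    rw [List.count_replicate]
    simp
  have hInv : pvInvB adj s ((List.replicate adj.length false).set s true) [s] := by
    refine ⟨hlen0, ?_, by simp, ?_, ?_, ?_⟩
    · rw [hsg s]; simp
    · intro y hy
      simp at hy
      subst hy
      rw [hsg y]; simp
    · intro x hx
      rw [hsg x] at hx
      have : x = s := of_decide_eq_true hx
      subst this
      exact Relation.ReflTransGen.refl
    · intro u hu hnstack v hv
      rw [hsg u] at hu
      have : u = s := of_decide_eq_true hu
      subst this
      simp at hnstack
  have hfu : [s].length + (adj.length -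
      ((List.replicate adj.length false).set s true).count true) ≤ adj.length + 1 := by
    rw [hcnt]
    simp
    omega
  obtain ⟨hL, hIff⟩ := pvDFSB_correct (adj.length + 1) _ [s] hInv hfu
  unfold pvSourceB
  rw [pvAllIff]
  rw [hL]
  constructor
  · intro h v hv
    exact (hIff v).mp (h v hv)
  · intro h v hv
    exact (hIff v).mpr (h v hv)

theorem pvOuterB_correct {adj : List (List Int)} :
    ∀ s, (pvOuterB adj s = true ↔
      ∀ i, s ≤ i → i < adj.length → ∀ v < adj.length, pvReach adj i v) := by
  intro s
  fun_induction pvOuterB adj s with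
  | case1 s h hsrc ih =>
    rw [ih]
    have hr := (pvSourceB_correct h).mp hsrc
    constructor
    · intro hall i h1 h2
      rcases Nat.eq_or_lt_of_le h1 with h3 | h3
      · exact h3 ▸ hr
      · exact hall i (by omega) h2
    · intro hall i h1 h2
      exact hall i (by omega) h2
  | case2 s h hsrc =>
    simp only [Bool.false_eq_true, false_iff]
    intro hall
    rw [Bool.not_eq_true] at hsrc
    have := (pvSourceB_correct h).mpr (hall s (le_refl _) h)
    rw [hsrc] at this
    simp at this
  | case3 s h =>
    simp only [true_iff]
    intro i h1 h2
    exact absurd h2 (by omega)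

theorem checkConnected_alt_iff (adj : List (List Int)) :
    (checkConnected_alt adj = true ↔
      ∀ i < adj.length, ∀ j < adj.length, pvReach adj i j) := by
  unfold checkConnected_alt
  rw [pvOuterB_correct 0]
  constructor
  · exact fun h i hi j hj => h i (Nat.zero_le _) hi j hj
  · exact fun h i _ hi j hj => h i hi j hj

-- ===== VERDICT (by name: the statement is the Claim_ definition above) =====
theorem checkConnected_spec : Claim_equal_checkConnected := by
  intro adj _ _
  unfold Spec_checkConnected
  exact Bool.coe_iff_coe.mp ((checkConnected_iff adj).trans (checkConnected_alt_iff adj).symm)
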